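-- pv_equiv track=rewrite | github.com/Sheldon-92/personalmanager | tests/test_security_critical.py | _is_input_safe
-- ===== SOURCE A (Python) =====
-- def _is_input_safe(input_str):
--     """Check if input is safe from injection attacks."""
--     # Check for dangerous characters and patterns
--     dangerous_chars = [';', '|', '&', '$', '`', '\n', '\r', '\x00', '>', '<']
--     dangerous_patterns = ['$(', '${', '&&', '||', '..', '~/', '../']
--
--     for char in dangerous_chars:
--         if char in input_str:
--             return False
--
--     for pattern in dangerous_patterns:
--         if pattern in input_str:
--             return False
--
--     return True
-- ===== SOURCE B (Python) =====
-- _DANGEROUS_CHARS = ';|&$`\n\r\x00><'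
-- _DANGEROUS_PAIRS = ('$(', '${', '&&', '||', '..', '~/')
--
--
-- def _is_input_safe(input_str):
--     """Single sliding-window pass: a char check and a 2-char window check per position."""
--     for i in range(len(input_str)):
--         if input_str[i] in _DANGEROUS_CHARS:
--             return False
--         if input_str[i:i + 2] in _DANGEROUS_PAIRS:
--             return False
--     return True
-- ===== Notes on version B (the rewrite author's own statement) =====
-- stated objective: alternative
-- what changed: Replaces A's 17 independent substring scans (one per dangerous char/pattern, with the redundant '../' dropped since '..' subsumes it) by a single sliding-window pass that checks each character and each 2-character window against constant tables.
import Mathlib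
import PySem

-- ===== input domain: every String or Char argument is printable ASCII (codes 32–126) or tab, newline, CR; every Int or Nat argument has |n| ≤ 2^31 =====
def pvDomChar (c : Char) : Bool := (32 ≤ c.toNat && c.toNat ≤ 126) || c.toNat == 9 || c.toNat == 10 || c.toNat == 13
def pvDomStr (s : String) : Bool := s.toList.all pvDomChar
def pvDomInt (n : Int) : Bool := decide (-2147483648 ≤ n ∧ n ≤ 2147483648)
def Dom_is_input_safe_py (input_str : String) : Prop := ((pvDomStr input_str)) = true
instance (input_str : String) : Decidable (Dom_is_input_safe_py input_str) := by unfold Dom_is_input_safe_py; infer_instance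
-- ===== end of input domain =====

-- B replaces A's several independent substring scans by one sliding-window pass over the string (objective: alternative decomposition).

-- ===== PORT A =====
def is_input_safe_py (input_str : String) : Bool :=
  let dangerous_chars : List String := [";", "|", "&", "$", "`", "\n", "\r", "\x00", ">", "<"]
  let dangerous_patterns : List String := ["$(", "${", "&&", "||", "..", "~/", "../"]
  if dangerous_chars.any (fun c => PySem.Str.isIn c input_str) then false
  else if dangerous_patterns.any (fun p => PySem.Str.isIn p input_str) then false
  else true

-- ===== PORT B =====
-- Source B's constants: a string of dangerous chars, a tuple of dangerous 2-char strings
def altChars : List Char := [';', '|', '&', '$', '`', '\n', '\r', '\x00', '>', '<']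
def altPairs : List (List Char) := [['$','('], ['$','{'], ['&','&'], ['|','|'], ['.','.'], ['~','/']]

-- the loop of Source B over positions i: input_str[i] is the head c, the slice input_str[i:i+2] is c :: rest.take 1
def altLoop : List Char → Bool
  | [] => true
  | c :: rest =>
    if altChars.contains c then false
    else if altPairs.contains (c :: rest.take 1) then false
    else altLoop rest

def is_input_safe_py_alt (input_str : String) : Bool := altLoop input_str.toList

-- ===== PRECONDITION & SPEC =====
def Spec_is_input_safe_py (input_str : String) (out : Bool) : Prop := out = is_input_safe_py_alt input_str
instance (input_str : String) (out : Bool) : Decidable (Spec_is_input_safe_py input_str out) := by unfold Spec_is_input_safe_py; infer_instance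

-- ===== CLAIM (what is proved, stated in full; the proofs are below) =====
def Claim_equal_is_input_safe_py : Prop := ∀ (input_str : String), Dom_is_input_safe_py input_str → Spec_is_input_safe_py input_str (is_input_safe_py input_str)

-- ===== LEMMAS AND PROOFS =====

-- common characterisation: some dangerous single char occurs, or some dangerous pair occurs as an infix
def Bad (L : List Char) : Prop :=
  (∃ c ∈ L, c ∈ altChars) ∨ (∃ p ∈ altPairs, p <:+: L)

theorem singleton_infix_iff (c : Char) (L : List Char) : [c] <:+: L ↔ c ∈ L := by
  constructor
  · intro h; exact List.singleton_sublist.mp h.sublist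
  · intro h
    obtain ⟨l1, l2, rfl⟩ := List.append_of_mem h
    exact ⟨l1, l2, by simp⟩

theorem dotdotslash_imp (L : List Char) (h : ['.','.','/'] <:+: L) : ['.','.'] <:+: L :=
  List.IsInfix.trans ⟨[], ['/'], rfl⟩ h

theorem A_false_iff (s : String) : is_input_safe_py s = false ↔ Bad s.toList := by
  unfold is_input_safe_py Bad
  simp only [List.any_cons, List.any_nil, Bool.or_false]
  rw [show ∀ b1 b2 : Bool, ((if b1 then false else if b2 then false else true) = false)
        ↔ (b1 = true ∨ b2 = true) by decide]
  simp only [Bool.or_eq_true, PySem.Str.isIn_iff_infix,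
    show (";" : String).toList = [';'] from rfl,
    show ("|" : String).toList = ['|'] from rfl,
    show ("&" : String).toList = ['&'] from rfl,
    show ("$" : String).toList = ['$'] from rfl,
    show ("`" : String).toList = ['`'] from rfl,
    show ("\n" : String).toList = ['\n'] from rfl,
    show ("\r" : String).toList = ['\r'] from rfl,
    show ("\x00" : String).toList = ['\x00'] from rfl,
    show (">" : String).toList = ['>'] from rfl,
    show ("<" : String).toList = ['<'] from rfl,
    show ("$(" : String).toList = ['$','('] from rfl,
    show ("${" : String).toList = ['$','{'] from rfl,
    show ("&&" : String).toList = ['&','&'] from rfl,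
    show ("||" : String).toList = ['|','|'] from rfl,
    show (".." : String).toList = ['.','.'] from rfl,
    show ("~/" : String).toList = ['~','/'] from rfl,
    show ("../" : String).toList = ['.','.','/'] from rfl,
    singleton_infix_iff, altChars, altPairs, List.mem_cons, List.not_mem_nil]
  constructor
  · rintro (h | h)
    · rcases h with h | h | h | h | h | h | h | h | h | h
      all_goals exact Or.inl ⟨_, h, by simp⟩
    · rcases h with h | h | h | h | h | h | h
      · exact Or.inr ⟨_, by simp, h⟩
      · exact Or.inr ⟨_, by simp, h⟩
      · exact Or.inr ⟨_, by simp, h⟩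
      · exact Or.inr ⟨_, by simp, h⟩
      · exact Or.inr ⟨_, by simp, h⟩
      · exact Or.inr ⟨_, by simp, h⟩
      · exact Or.inr ⟨['.','.'], by simp, dotdotslash_imp _ h⟩
  · rintro (⟨c, hc, hm⟩ | ⟨p, hp, hm⟩)
    · rcases hm with rfl | rfl | rfl | rfl | rfl | rfl | rfl | rfl | rfl | rfl | f
      all_goals exact Or.inl (by tauto)
    · rcases hp with rfl | rfl | rfl | rfl | rfl | rfl | f
      all_goals exact Or.inr (by tauto)

theorem bad_nil : ¬ Bad [] := by
  rintro (⟨c, hc, _⟩ | ⟨p, hp, hm⟩)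
  · exact List.not_mem_nil hc
  · rw [List.infix_nil] at hm
    subst hm
    simp [altPairs] at hp

theorem pair_prefix_window (c : Char) (rest : List Char) (p : List Char)
    (hp : p ∈ altPairs) (h : p <+: c :: rest) : p = c :: rest.take 1 := by
  have hlen : p.length = 2 := by revert hp; simp [altPairs]; rintro (rfl|rfl|rfl|rfl|rfl|rfl) <;> rfl
  match p, hlen with
  | [a, b], _ =>
    obtain ⟨t, ht⟩ := h
    cases rest with
    | nil => simp at ht
    | cons d rest' =>
      simp only [List.cons_append, List.cons.injEq] at ht
      obtain ⟨rfl, rfl, -⟩ := ht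
      rfl

theorem B_false_iff (L : List Char) : altLoop L = false ↔ Bad L := by
  induction L with
  | nil => simpa [altLoop] using bad_nil
  | cons c rest ih =>
    unfold altLoop
    by_cases h1 : altChars.contains c
    · simp only [h1, if_true, true_iff]
      exact Or.inl ⟨c, List.mem_cons_self, by simpa using h1⟩
    · by_cases h2 : altPairs.contains (c :: rest.take 1)
      · simp only [h1, h2, Bool.false_eq_true, if_false, if_true, true_iff]
        have hw : (c :: rest.take 1) <+: c :: rest := by
          cases rest with
          | nil => exact List.prefix_refl _
          | cons d r => exact ⟨r, rfl⟩
        exact Or.inr ⟨c :: rest.take 1, by simpa using h2, hw.isInfix⟩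
      · simp only [h1, h2, Bool.false_eq_true, if_false]
        rw [ih]
        constructor
        · rintro (⟨d, hd, hm⟩ | ⟨p, hp, hm⟩)
          · exact Or.inl ⟨d, List.mem_cons_of_mem _ hd, hm⟩
          · exact Or.inr ⟨p, hp, hm.trans (List.suffix_cons c rest).isInfix⟩
        · rintro (⟨d, hd, hm⟩ | ⟨p, hp, hm⟩)
          · rcases List.mem_cons.mp hd with rfl | hd
            · exact absurd hm (by simpa using h1)
            · exact Or.inl ⟨d, hd, hm⟩
          · rcases List.infix_cons_iff.mp hm with hpre | hinf
            · exact absurd (pair_prefix_window c rest p hp hpre ▸ hp)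
                (by simpa using h2)
            · exact Or.inr ⟨p, hp, hinf⟩

-- ===== VERDICT (by name: the statement is the Claim_ definition above) =====
theorem is_input_safe_py_spec : Claim_equal_is_input_safe_py := by
  intro s _
  unfold Spec_is_input_safe_py is_input_safe_py_alt
  rcases hA : is_input_safe_py s with _ | _
  · exact ((B_false_iff s.toList).mpr ((A_false_iff s).mp hA)).symm
  · rcases hB : altLoop s.toList with _ | _
    · exact absurd ((A_false_iff s).mpr ((B_false_iff s.toList).mp hB)) (by simp [hA])
    · rfl
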